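-- pv_equiv track=rewrite | github.com/ocuz/MEOV | main30.py | combo_count
-- ===== SOURCE A (Python) =====
-- CHARSETS = {
--     "C": "bcdfghjklmnpqrstvwxyz",
--     "V": "aeiou",
--     "D": "0123456789",
--     "L": "abcdefghijklmnopqrstuvwxyz",
--     "Q": "abcdefghijklmnopqrstuvwxyz0123456789",
--     "_": "_",
-- }
--
-- def parse_pattern(fmt):
--     tokens = []
--     i = 0
--     while i < len(fmt):
--         if fmt[i] == "[":
--             end = fmt.index("]", i)
--             inner = fmt[i + 1 : end]
--             if len(inner) == 1:
--                 tokens.append(("lit", inner))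
--             else:
--                 tokens.append(("custom", inner))
--             i = end + 1
--         else:
--             ch = fmt[i].upper()
--             if ch in CHARSETS:
--                 tokens.append(("key", ch))
--             else:
--                 tokens.append(("lit", fmt[i]))
--             i += 1
--     return tokens
--
-- def combo_count(fmt):
--     tokens = parse_pattern(fmt)
--     total = 1
--     for kind, val in tokens:
--         if kind == "key":
--             total *= len(CHARSETS[val])
--         elif kind == "custom":
--             total *= len(val)
--     return total
-- ===== SOURCE B (Python) =====
-- CHARSETS = {
--     "C": "bcdfghjklmnpqrstvwxyz",
--     "V": "aeiou",
--     "D": "0123456789",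
--     "L": "abcdefghijklmnopqrstuvwxyz",
--     "Q": "abcdefghijklmnopqrstuvwxyz0123456789",
--     "_": "_",
-- }
--
-- def combo_count(fmt):
--     total = 1
--     i = 0
--     n = len(fmt)
--     while i < n:
--         if fmt[i] == "[":
--             end = fmt.index("]", i)
--             inner_len = end - i - 1
--             if inner_len != 1:
--                 total *= inner_len
--             i = end + 1
--         else:
--             cs = CHARSETS.get(fmt[i].upper())
--             if cs is not None:
--                 total *= len(cs)
--             i += 1
--     return total
-- ===== Notes on version B (the rewrite author's own statement) =====
-- stated objective: simpler
-- what changed: Collapses A's two-stage parse-then-multiply (building an intermediate token list, slicing out bracket contents) into a single index scan that multiplies a running total directly, computing each bracket's factor from index arithmetic (end - i - 1) instead of materialising slices or tokens.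
import Mathlib
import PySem

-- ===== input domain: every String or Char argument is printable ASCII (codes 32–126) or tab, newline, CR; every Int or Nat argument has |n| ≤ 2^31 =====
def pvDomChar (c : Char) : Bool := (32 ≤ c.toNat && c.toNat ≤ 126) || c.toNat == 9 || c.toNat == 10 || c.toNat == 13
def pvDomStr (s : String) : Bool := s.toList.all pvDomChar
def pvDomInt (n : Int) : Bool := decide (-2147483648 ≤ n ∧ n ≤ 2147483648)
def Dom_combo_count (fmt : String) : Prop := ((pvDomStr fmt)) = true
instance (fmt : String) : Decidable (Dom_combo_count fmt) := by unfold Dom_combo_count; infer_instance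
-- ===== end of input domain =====

-- B replaces A's parse-into-token-list-then-multiply with a single index scan that multiplies a
-- running total directly (objective: simpler). Both Pythons raise ValueError on an unterminated
-- '[', which Pre_combo_count excludes.

-- ===== PORT A =====

-- the module constant CHARSETS (keys are single characters, so keyed by Char)
def pvCharsets : PySem.Dict Char (List Char) := PySem.Dict.ofList
  [('C', "bcdfghjklmnpqrstvwxyz".toList), ('V', "aeiou".toList), ('D', "0123456789".toList),
   ('L', "abcdefghijklmnopqrstuvwxyz".toList),
   ('Q', "abcdefghijklmnopqrstuvwxyz0123456789".toList), ('_', ['_'])]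

-- fmt.index("]", i) relative to the current suffix: hand port, exact — splits the suffix at the
-- first ']' into (inner, rest-after-']'); none = ValueError
def pvFindClose (l : List Char) : Option (List Char × List Char) :=
  match l with
  | [] => none
  | c :: r => if c = ']' then some ([], r) else (pvFindClose r).map (fun p => (c :: p.1, p.2))

theorem pvFindClose_len {l : List Char} {p : List Char × List Char}
    (h : pvFindClose l = some p) : p.2.length < l.length := by
  induction l generalizing p with
  | nil => simp [pvFindClose] at h
  | cons c r ih =>
    simp only [pvFindClose] at h
    split at h
    · cases h; simp
    · cases hf : pvFindClose r with
      | none => simp [hf] at h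
      | some q =>
        simp only [hf, Option.map_some] at h
        cases h
        have := ih hf
        simpa using Nat.lt_succ_of_lt this

-- Python tokens ("lit", s) / ("custom", s) / ("key", ch) as a tagged type
inductive PvTok where
  | lit : List Char → PvTok
  | custom : List Char → PvTok
  | key : Char → PvTok
deriving DecidableEq, Repr

-- parse_pattern; none = the ValueError from fmt.index
def parse_pattern (l : List Char) : Option (List PvTok) :=
  match l with
  | [] => some []
  | c :: rest =>
    if c = '[' then
      match hf : pvFindClose rest with
      | none => none
      | some p =>
        (parse_pattern p.2).map
          ((if p.1.length = 1 then PvTok.lit p.1 else PvTok.custom p.1) :: ·)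
    else
      let ch := PySem.Chars.upperChar c
      (parse_pattern rest).map
        ((if pvCharsets.contains ch then PvTok.key ch else PvTok.lit [c]) :: ·)
termination_by l.length
decreasing_by
  · exact Nat.lt_succ_of_lt (pvFindClose_len hf)
  · simp

def pvStepA (total : Int) (t : PvTok) : Int :=
  match t with
  | PvTok.key ch => total * ((pvCharsets.getD ch []).length : Int)
  | PvTok.custom v => total * (v.length : Int)
  | PvTok.lit _ => total

def combo_count (fmt : String) : Int :=
  match parse_pattern fmt.toList with
  | none => 0   -- Python raises ValueError here; excluded by Pre_combo_count
  | some tokens => tokens.foldl pvStepA 1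

-- ===== PORT B =====

-- fmt.index("]", i) - i - 1 on the current suffix: index of the first ']' (hand port, exact;
-- none = ValueError)
def pvIndexClose (l : List Char) : Option Nat :=
  match l with
  | [] => none
  | c :: r => if c = ']' then some 0 else (pvIndexClose r).map (· + 1)

-- the while loop of B: one pass, multiplying the running total in place
def pvComboLoop (l : List Char) (total : Int) : Int :=
  match l with
  | [] => total
  | c :: rest =>
    if c = '[' then
      match pvIndexClose rest with
      | none => 0   -- Source B raises ValueError here; excluded by Pre_combo_count
      | some k =>
        pvComboLoop (rest.drop (k + 1)) (if k ≠ 1 then total * (k : Int) else total)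
    else
      pvComboLoop rest
        (match pvCharsets.get? (PySem.Chars.upperChar c) with
         | some cs => total * (cs.length : Int)
         | none => total)
termination_by l.length
decreasing_by
  · have h1 : (rest.drop (k + 1)).length ≤ rest.length := by
      simp [List.length_drop]
    have h2 : (c :: rest).length = rest.length + 1 := by simp
    omega
  · simp

def combo_count_alt (fmt : String) : Int := pvComboLoop fmt.toList 1

-- ===== PRECONDITION & SPEC =====
-- Pre_ excludes exactly the strings with an unterminated '[' (no ']' at or after some processed
-- '['), on which the Python A raises ValueError from fmt.index (B raises there too).
def Pre_combo_count (fmt : String) : Prop :=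
  ∀ i < fmt.toList.length, fmt.toList[i]? = some '[' →
    ∃ j < fmt.toList.length, i < j ∧ fmt.toList[j]? = some ']'
instance (fmt : String) : Decidable (Pre_combo_count fmt) := by
  unfold Pre_combo_count; infer_instance

def pvWitness_combo_count : String := "[ab]D[]x"

def Spec_combo_count (fmt : String) (out : Int) : Prop := out = combo_count_alt fmt
instance (fmt : String) (out : Int) : Decidable (Spec_combo_count fmt out) := by
  unfold Spec_combo_count; infer_instance

-- ===== CLAIM (what is proved, stated in full; the proofs are below) =====
def Claim_equal_combo_count : Prop :=
  ∀ (fmt : String), Dom_combo_count fmt → Pre_combo_count fmt →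
    Spec_combo_count fmt (combo_count fmt)

-- ===== LEMMAS AND PROOFS =====

-- unfolding equations for parse_pattern (defined by well-founded recursion)
theorem parse_pattern_nil : parse_pattern [] = some [] := by
  rw [parse_pattern]

theorem parse_pattern_bracket (rest : List Char) :
    parse_pattern ('[' :: rest) =
      match pvFindClose rest with
      | none => none
      | some p =>
        (parse_pattern p.2).map
          ((if p.1.length = 1 then PvTok.lit p.1 else PvTok.custom p.1) :: ·) := by
  rw [parse_pattern]
  split
  · split
    · rename_i h; rw [h]
    · rename_i p h; rw [h]
  · rename_i h; exact absurd rfl h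

theorem parse_pattern_char (c : Char) (rest : List Char) (hc : c ≠ '[') :
    parse_pattern (c :: rest) =
      (parse_pattern rest).map
        ((if pvCharsets.contains (PySem.Chars.upperChar c) then PvTok.key (PySem.Chars.upperChar c)
          else PvTok.lit [c]) :: ·) := by
  rw [parse_pattern]
  simp only [if_neg hc]

-- pvIndexClose is pvFindClose's split, read as a position: same success, inner length = index,
-- remainder = drop past the ']'
theorem pvIndex_eq_find (l : List Char) :
    (pvFindClose l).map (fun p => (p.1.length, p.2)) =
      (pvIndexClose l).map (fun k => (k, l.drop (k + 1))) := by
  induction l with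
  | nil => simp [pvFindClose, pvIndexClose]
  | cons c r ih =>
    by_cases hc : c = ']'
    · simp [pvFindClose, pvIndexClose, hc]
    · simp only [pvFindClose, pvIndexClose, hc]
      cases hf : pvFindClose r with
      | none =>
        cases hk : pvIndexClose r with
        | none => simp
        | some k => rw [hf, hk] at ih; simp at ih
      | some p =>
        cases hk : pvIndexClose r with
        | none => rw [hf, hk] at ih; simp at ih
        | some k =>
          rw [hf, hk] at ih
          simp only [Option.map_some, Option.some.injEq, Prod.mk.injEq] at ih
          simp [ih.1, ih.2]

-- A's per-character token step equals B's direct charset lookup (the lit payload is irrelevant)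
theorem pvCharsets_step (total : Int) (c ch : Char) :
    pvStepA total (if pvCharsets.contains ch then PvTok.key ch else PvTok.lit [c]) =
      (match pvCharsets.get? ch with
       | some cs => total * (cs.length : Int)
       | none => total) := by
  cases hg : pvCharsets.get? ch with
  | none => simp [PySem.Dict.contains_eq_isSome_get?, hg, pvStepA]
  | some cs =>
    simp [PySem.Dict.contains_eq_isSome_get?, hg, pvStepA, PySem.Dict.getD_eq_get?_getD]

-- main loop invariant: A's fold over the parsed tokens of a suffix equals B's direct loop
theorem pvMain : ∀ n (l : List Char), l.length ≤ n → ∀ total : Int,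
    (match parse_pattern l with
     | none => (0 : Int)
     | some ts => ts.foldl pvStepA total) = pvComboLoop l total := by
  intro n
  induction n with
  | zero =>
    intro l hl total
    have : l = [] := List.eq_nil_of_length_eq_zero (Nat.le_zero.mp hl)
    subst this
    rw [parse_pattern_nil, pvComboLoop]
    simp
  | succ n ih =>
    intro l hl total
    match l with
    | [] => rw [parse_pattern_nil, pvComboLoop]; simp
    | c :: rest =>
      by_cases hc : c = '['
      · subst hc
        have hfk := pvIndex_eq_find rest
        rw [parse_pattern_bracket, pvComboLoop, if_pos rfl]
        cases hf : pvFindClose rest with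
        | none =>
          rw [hf] at hfk
          cases hk : pvIndexClose rest with
          | none => simp
          | some k => rw [hk] at hfk; simp at hfk
        | some p =>
          rw [hf] at hfk
          cases hk : pvIndexClose rest with
          | none => rw [hk] at hfk; simp at hfk
          | some k =>
            rw [hk] at hfk
            simp only [Option.map_some, Option.some.injEq, Prod.mk.injEq] at hfk
            simp only []
            have hlen : p.2.length ≤ n := by
              have := pvFindClose_len hf
              simp only [List.length_cons] at hl
              omega
            rw [← hfk.2, ← hfk.1,
                ← ih p.2 hlen (if p.1.length ≠ 1 then total * (p.1.length : Int) else total)]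
            cases hp : parse_pattern p.2 with
            | none => simp
            | some ts =>
              simp only [Option.map_some, List.foldl_cons]
              congr 1
              by_cases h1 : p.1.length = 1
              · simp [h1, pvStepA]
              · simp [h1, pvStepA]
      · have hlen : rest.length ≤ n := by
          simp only [List.length_cons] at hl; omega
        have hrec := ih rest hlen
          (match pvCharsets.get? (PySem.Chars.upperChar c) with
           | some cs => total * (cs.length : Int)
           | none => total)
        rw [parse_pattern_char c rest hc, pvComboLoop]
        simp only [if_neg hc]
        cases hp : parse_pattern rest with
        | none =>
          rw [hp] at hrec
          simpa using hrec
        | some ts =>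
          rw [hp] at hrec
          simp only [Option.map_some, List.foldl_cons, pvCharsets_step]
          simpa using hrec
-- ===== VERDICT (by name: the statement is the Claim_ definition above) =====
theorem combo_count_spec : Claim_equal_combo_count := by
  intro fmt _ _
  unfold Spec_combo_count combo_count combo_count_alt
  exact pvMain fmt.toList.length fmt.toList (le_refl _) 1
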